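-- pv_equiv track=rewrite | github.com/YuxiLiuAsana/DataStructure-Algorithm | q0085.py | helper
-- ===== SOURCE A (Python) =====
-- def helper(matrix, sr, sc):
--     mn = len(matrix[0])-sc
--     mx = 0
--     for i in range(sr,len(matrix)):
--         if matrix[i][sc] == "0":
--             break
--         for j in range(sc,len(matrix[i]) + 1):
--             if j == len(matrix[i]) or matrix[i][j] == "0":
--                 mn = min(mn,j-sc)
--                 mx = max(mx, (i + 1 -sr)* mn)
--                 break
--     return mx
-- ===== SOURCE B (Python) =====
-- def helper(matrix, sr, sc):
--     # Dual (column-major) enumeration: instead of scanning rows and tracking a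
--     # running-min width, enumerate candidate widths d = 1..cap and shrink the
--     # prefix of rows that still supports width d; best = max d * height(d).
--     cap = len(matrix[0]) - sc
--     h = len(matrix) - sr
--     best = 0
--     for d in range(1, cap + 1):
--         t = 0
--         while t < h:
--             row = matrix[sr + t]
--             j = sc + d - 1
--             if j >= len(row) or row[j] == "0":
--                 break
--             t += 1
--         h = t
--         if h == 0:
--             break
--         best = max(best, d * h)
--     return best
-- ===== Notes on version B (the rewrite author's own statement) =====
-- stated objective: alternative
-- what changed: Replaces A's row-major scan (per-row inner scan for the first '0', tracking a running-min width and max area) by the dual column-major enumeration: for each candidate width d = 1..cap it shrinks the prefix of rows that still supports width d by checking only column sc+d-1, taking max of d*height(d).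
-- outside the precondition, e.g. on helper([['1', '1'], ['1', '1']], -2, 0): A returns 8, B returns 8; on helper([['1', '1']], 0, -1): A returns 3, B returns 3; on helper([['0'], []], 0, 0): A returns 0, B returns 0
import Mathlib
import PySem

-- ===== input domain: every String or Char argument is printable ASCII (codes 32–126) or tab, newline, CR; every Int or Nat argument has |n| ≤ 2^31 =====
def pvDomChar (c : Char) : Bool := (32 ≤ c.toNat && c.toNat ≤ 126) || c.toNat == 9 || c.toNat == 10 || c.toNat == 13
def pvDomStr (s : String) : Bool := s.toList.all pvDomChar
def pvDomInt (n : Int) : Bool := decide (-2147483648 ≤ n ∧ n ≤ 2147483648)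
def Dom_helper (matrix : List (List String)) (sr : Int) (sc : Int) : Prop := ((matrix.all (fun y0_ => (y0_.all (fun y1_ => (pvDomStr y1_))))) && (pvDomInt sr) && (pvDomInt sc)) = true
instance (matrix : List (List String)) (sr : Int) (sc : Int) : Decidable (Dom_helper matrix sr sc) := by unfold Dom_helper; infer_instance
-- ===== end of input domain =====

-- B enumerates candidate widths instead of rows (the dual direction), shrinking the
-- prefix of rows that supports each width; same return value, no speed claim.

-- ===== PORT A =====
-- inner 'for j in range(sc, len(row)+1): if j == len(row) or row[j] == "0": ... break'
def innerA (row : List String) : List Int → Option Int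
  | [] => none
  | j :: rest =>
    if j = (row.length : Int) ∨ (PySem.List.pyGet? row j).getD "" = "0" then some j
    else innerA row rest

-- outer 'for i in range(sr, len(matrix))' with state (mn, mx) and early break
def loopA (matrix : List (List String)) (sr sc : Int) : List Int → Int → Int → Int
  | [], _, mx => mx
  | i :: rest, mn, mx =>
    let row := (PySem.List.pyGet? matrix i).getD []
    if (PySem.List.pyGet? row sc).getD "" = "0" then mx
    else
      match innerA row (PySem.List.pyRange sc ((row.length : Int) + 1) 1) with
      | none => loopA matrix sr sc rest mn mx
      | some j =>
        let mn' := min mn (j - sc)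
        let mx' := max mx ((i + 1 - sr) * mn')
        loopA matrix sr sc rest mn' mx'

def helper (matrix : List (List String)) (sr : Int) (sc : Int) : Int :=
  let mn := (((PySem.List.pyGet? matrix 0).getD []).length : Int) - sc
  loopA matrix sr sc (PySem.List.pyRange sr (matrix.length : Int) 1) mn 0

-- ===== PORT B =====
-- inner 'while t < h: row = matrix[sr+t]; j = sc+d-1; if j >= len(row) or row[j]=="0": break; t += 1'
def innerB (matrix : List (List String)) (sr sc d : Int) : List Int → Int → Int
  | [], t => t
  | _ :: rest, t =>
    let row := (PySem.List.pyGet? matrix (sr + t)).getD []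
    let j := sc + d - 1
    if (row.length : Int) ≤ j ∨ (PySem.List.pyGet? row j).getD "" = "0" then t
    else innerB matrix sr sc d rest (t + 1)

-- outer 'for d in range(1, cap+1): … h = t; if h == 0: break; best = max(best, d*h)'
def outerB (matrix : List (List String)) (sr sc : Int) : List Int → Int → Int → Int
  | [], _, best => best
  | d :: rest, h, best =>
    let t := innerB matrix sr sc d (PySem.List.pyRange 0 h 1) 0
    if t = 0 then best
    else outerB matrix sr sc rest t (max best (d * t))

def helper_alt (matrix : List (List String)) (sr : Int) (sc : Int) : Int :=
  let cap := (((PySem.List.pyGet? matrix 0).getD []).length : Int) - sc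
  outerB matrix sr sc (PySem.List.pyRange 1 (cap + 1) 1) ((matrix.length : Int) - sr) 0

-- ===== PRECONDITION & SPEC =====
-- Pre_ restricts to the natural domain: matrix nonempty, nonnegative anchor (negative
-- sr/sc hit Python's negative-index wraparound, where both values are accidental), and
-- every row from sr on at least sc+1 wide (A raises IndexError on a too-short row it
-- reaches; too-short rows after A's break are also excluded, slightly narrowing the domain).
def Pre_helper (matrix : List (List String)) (sr : Int) (sc : Int) : Prop :=
  matrix ≠ [] ∧ 0 ≤ sr ∧ 0 ≤ sc ∧ ∀ row ∈ matrix.drop sr.toNat, sc < (row.length : Int)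
instance (matrix : List (List String)) (sr : Int) (sc : Int) : Decidable (Pre_helper matrix sr sc) := by unfold Pre_helper; infer_instance
def pvWitness_helper : List (List String) × Int × Int := ([["1","1"],["1","0"]], 0, 0)

def Spec_helper (matrix : List (List String)) (sr : Int) (sc : Int) (out : Int) : Prop := out = helper_alt matrix sr sc
instance (matrix : List (List String)) (sr : Int) (sc : Int) (out : Int) : Decidable (Spec_helper matrix sr sc out) := by unfold Spec_helper; infer_instance

-- ===== CLAIM (what is proved, stated in full; the proofs are below) =====
def Claim_equal_helper : Prop := ∀ (matrix : List (List String)) (sr : Int) (sc : Int), Dom_helper matrix sr sc → Pre_helper matrix sr sc → Spec_helper matrix sr sc (helper matrix sr sc)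

-- ===== LEMMAS AND PROOFS =====

-- first-zero position (as an Int offset) of a row tail
def zpos (t : List String) : Int :=
  if t.contains "0" then (t.idxOf "0" : Int) else (t.length : Int)

-- run widths of the consecutive unblocked rows (proof-side characterisation of both loops)
def widthsZ (sc : Int) : List (List String) → List Int
  | [] => []
  | row :: rest =>
    if sc < (row.length : Int) ∧ ¬ ((PySem.List.pyGet? row sc).getD "" = "0") then
      zpos (row.drop sc.toNat) :: widthsZ sc rest
    else []

-- the step of A's accumulated (height, running-min, best) state
def stepB (st : Int × Int × Int) (w : Int) : Int × Int × Int :=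
  (st.1 + 1, min st.2.1 w, max st.2.2 (st.1 * min st.2.1 w))

def mList (ws : List Int) (c : Int) (h : Nat) : Int := (ws.take h).foldl min c
def HI (ws : List Int) (d : Int) : Nat := (ws.takeWhile (fun w => decide (d ≤ w))).length
def maxfrom (x : Int) (L : List Int) : Int := L.foldl max x

-- the cell test of B's inner while, at Nat offset t
def okB (matrix : List (List String)) (sr sc d : Int) (t : Nat) : Bool :=
  !(decide ((((PySem.List.pyGet? matrix (sr + (t : Int))).getD []).length : Int) ≤ sc + d - 1) ||
    decide ((PySem.List.pyGet? ((PySem.List.pyGet? matrix (sr + (t : Int))).getD []) (sc + d - 1)).getD "" = "0"))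

-- B's inner while as a fuelled counter
def cnt (matrix : List (List String)) (sr sc d : Int) : Nat → Nat → Nat
  | 0, t => t
  | n + 1, t => if okB matrix sr sc d t then cnt matrix sr sc d n (t + 1) else t

theorem innerA_eq (t pre : List String) :
    ∀ (row : List String), row = pre ++ t →
    innerA row (PySem.List.pyRange (pre.length : Int) ((row.length : Int) + 1) 1) =
      some ((pre.length : Int) + zpos t) := by
  induction t generalizing pre with
  | nil =>
    intro row hrow
    subst hrow
    simp only [List.append_nil]
    rw [PySem.List.pyRange_one_singleton]
    simp [innerA, zpos]
  | cons c t' ih =>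
    intro row hrow
    rw [PySem.List.pyRange_one_cons (by simp [hrow]; omega)]
    unfold innerA
    by_cases hc : c = "0"
    · subst hrow hc
      simp [zpos]
    · have hne : ¬ ((pre.length : Int) = (row.length : Int) ∨
          (PySem.List.pyGet? row (pre.length : Int)).getD "" = "0") := by
        subst hrow
        simp [hc]
        omega
      rw [if_neg hne]
      have hih := ih (pre ++ [c]) row (by simp [hrow])
      simp only [List.length_append, List.length_cons, List.length_nil] at hih
      push_cast at hih ⊢
      have hz : zpos (c :: t') = 1 + zpos t' := by
        unfold zpos
        have hb1 : ("0" == c) = false := beq_eq_false_iff_ne.mpr (fun h => hc h.symm)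
        have hb2 : (c == "0") = false := beq_eq_false_iff_ne.mpr hc
        simp only [List.contains_cons, List.idxOf_cons, hb1, hb2, Bool.false_or, cond_false]
        split_ifs <;> (try simp only [List.length_cons]) <;> push_cast <;> ring
      rw [hz, ← add_assoc]
      exact hih

theorem loop_eq (matrix : List (List String)) (sr sc : Int) (h0 : 0 ≤ sc) :
    ∀ (t pre : List (List String)), matrix = pre ++ t →
    (∀ row ∈ t, sc < (row.length : Int)) →
    ∀ (mn mx : Int),
    loopA matrix sr sc (PySem.List.pyRange (pre.length : Int) (matrix.length : Int) 1) mn mx =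
      ((widthsZ sc t).foldl stepB ((pre.length : Int) - sr + 1, mn, mx)).2.2 := by
  intro t
  induction t with
  | nil =>
    intro pre hm _ mn mx
    rw [PySem.List.pyRange_one_eq_nil (by subst hm; simp)]
    simp [loopA, widthsZ]
  | cons row t' ih =>
    intro pre hm hw mn mx
    have hlt : (pre.length : Int) < (matrix.length : Int) := by
      subst hm; simp only [List.length_append, List.length_cons]; push_cast; omega
    rw [PySem.List.pyRange_one_cons hlt]
    unfold loopA
    have hrow : (PySem.List.pyGet? matrix (pre.length : Int)).getD [] = row := by
      rw [hm, PySem.List.pyGet?_append_length]; rfl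
    rw [hrow]
    have hsc : sc < (row.length : Int) := hw row (by simp)
    by_cases hz : (PySem.List.pyGet? row sc).getD "" = "0"
    · rw [if_pos hz]
      have hwB : widthsZ sc (row :: t') = [] := by
        rw [widthsZ, if_neg (by simp [hsc, hz])]
      rw [hwB]
      simp
    · rw [if_neg hz]
      have hinner := innerA_eq (row.drop sc.toNat) (row.take sc.toNat) row (by simp)
      have hlen : (((row.take sc.toNat)).length : Int) = sc := by
        simp only [List.length_take]; omega
      rw [hlen] at hinner
      rw [hinner]
      show loopA matrix sr sc (PySem.List.pyRange ((pre.length : Int) + 1) (matrix.length : Int) 1)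
            (min mn (sc + zpos (row.drop sc.toNat) - sc))
            (max mx (((pre.length : Int) + 1 - sr) * min mn (sc + zpos (row.drop sc.toNat) - sc))) = _
      have hzz : sc + zpos (row.drop sc.toNat) - sc = zpos (row.drop sc.toNat) := by ring
      rw [hzz]
      have hpl : (((pre ++ [row]).length : Nat) : Int) = (pre.length : Int) + 1 := by
        simp
      have hih := ih (pre ++ [row]) (by simpa using hm)
        (fun r hr => hw r (List.mem_cons_of_mem _ hr))
        (min mn (zpos (row.drop sc.toNat)))
        (max mx (((pre.length : Int) + 1 - sr) * min mn (zpos (row.drop sc.toNat))))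
      rw [hpl] at hih
      have hwB : widthsZ sc (row :: t') = zpos (row.drop sc.toNat) :: widthsZ sc t' := by
        rw [widthsZ, if_pos ⟨hsc, hz⟩]
      have e2 : (pre.length : Int) - sr + 1 = (pre.length : Int) + 1 - sr := by ring
      have hs : (((pre.length : Int) + 1 - sr + 1, min mn (zpos (row.drop sc.toNat)),
            max mx (((pre.length : Int) + 1 - sr) * min mn (zpos (row.drop sc.toNat)))) :
              Int × Int × Int)
          = stepB ((pre.length : Int) - sr + 1, mn, mx) (zpos (row.drop sc.toNat)) := by
        simp only [stepB, Prod.mk.injEq, true_and]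
        exact ⟨by ring, by rw [e2]⟩
      rw [hih, hwB, List.foldl_cons, ← hs]

theorem fold_stepB (ws : List Int) : ∀ (a c x : Int),
    (ws.foldl stepB (a, c, x)).2.2 =
      maxfrom x ((List.range ws.length).map (fun (k : Nat) => (a + (k : Int)) * mList ws c (k + 1))) := by
  induction ws with
  | nil => intro a c x; simp [maxfrom, mList]
  | cons w t ih =>
    intro a c x
    have hstep : stepB (a, c, x) w = (a + 1, min c w, max x (a * min c w)) := rfl
    have h0 : mList (w :: t) c 1 = min c w := rfl
    have hcs : ∀ k : Nat, mList (w :: t) c (k + 2) = mList t (min c w) (k + 1) := by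
      intro k; rfl
    calc ((w :: t).foldl stepB (a, c, x)).2.2
        = (t.foldl stepB (a + 1, min c w, max x (a * min c w))).2.2 := by
          rw [List.foldl_cons, hstep]
      _ = maxfrom (max x (a * min c w))
            ((List.range t.length).map (fun (k : Nat) => (a + 1 + (k : Int)) * mList t (min c w) (k + 1))) := ih _ _ _
      _ = maxfrom x ((List.range (w :: t).length).map
            (fun (k : Nat) => (a + (k : Int)) * mList (w :: t) c (k + 1))) := by
          rw [List.length_cons, List.range_succ_eq_map, List.map_cons, List.map_map]
          show maxfrom (max x _) _ = maxfrom (max x _) _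
          congr 2
          · simp [mList]
          · funext k
            show (a + 1 + (k : Int)) * mList t (min c w) (k + 1)
                = (a + ((k + 1 : Nat) : Int)) * mList (w :: t) c (k + 1 + 1)
            rw [hcs k]
            push_cast; ring

-- maxfrom basics
theorem le_maxfrom_self (L : List Int) : ∀ x, x ≤ maxfrom x L := by
  induction L with
  | nil => intro x; exact le_rfl
  | cons y t ih => intro x; exact le_trans (le_max_left x y) (ih (max x y))
theorem le_maxfrom_of_mem (L : List Int) : ∀ x y, y ∈ L → y ≤ maxfrom x L := by
  induction L with
  | nil => intro _ _ h; cases h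
  | cons z t ih =>
    intro x y hy
    rcases List.mem_cons.mp hy with h | h
    · subst h; exact le_trans (le_max_right x y) (le_maxfrom_self t (max x y))
    · exact ih (max x z) y h
theorem maxfrom_le (L : List Int) : ∀ x c, x ≤ c → (∀ y ∈ L, y ≤ c) → maxfrom x L ≤ c := by
  induction L with
  | nil => intro x c h _; exact h
  | cons z t ih =>
    intro x c hx hy
    exact ih (max x z) c (max_le hx (hy z (by simp))) (fun y h => hy y (by simp [h]))
theorem maxfrom_const_le (L : List Int) (x : Int) (h : ∀ y ∈ L, y ≤ x) : maxfrom x L = x :=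
  le_antisymm (maxfrom_le L x x le_rfl h) (le_maxfrom_self L x)

-- foldl min basics
theorem foldl_min_le_init (l : List Int) : ∀ c, l.foldl min c ≤ c := by
  induction l with
  | nil => intro c; exact le_rfl
  | cons y t ih => intro c; exact le_trans (ih (min c y)) (min_le_left c y)
theorem foldl_min_le_mem (l : List Int) : ∀ c x, x ∈ l → l.foldl min c ≤ x := by
  induction l with
  | nil => intro _ _ h; cases h
  | cons z t ih =>
    intro c x hx
    rcases List.mem_cons.mp hx with h | h
    · subst h; exact le_trans (foldl_min_le_init t (min c x)) (min_le_right c x)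
    · exact ih (min c z) x h
theorem le_foldl_min (l : List Int) : ∀ c d, d ≤ c → (∀ x ∈ l, d ≤ x) → d ≤ l.foldl min c := by
  induction l with
  | nil => intro _ _ h _; exact h
  | cons z t ih =>
    intro c d hc hx
    exact ih (min c z) d (le_min hc (hx z (by simp))) (fun x h => hx x (by simp [h]))

-- zpos basics
theorem zpos_cons (c : String) (t : List String) :
    zpos (c :: t) = if c = "0" then 0 else 1 + zpos t := by
  unfold zpos
  by_cases hc : c = "0"
  · subst hc; simp
  · have hb1 : ("0" == c) = false := beq_eq_false_iff_ne.mpr (fun h => hc h.symm)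
    have hb2 : (c == "0") = false := beq_eq_false_iff_ne.mpr hc
    simp only [List.contains_cons, List.idxOf_cons, hb1, hb2, Bool.false_or, cond_false, if_neg hc]
    split_ifs <;> (try simp only [List.length_cons]) <;> push_cast <;> ring
theorem zpos_nonneg (t : List String) : 0 ≤ zpos t := by
  induction t with
  | nil => simp [zpos]
  | cons c t ih => rw [zpos_cons]; split_ifs <;> omega
theorem zpos_succ_iff (t : List String) : ∀ (k : Nat),
    ((k : Int) + 1 ≤ zpos t) ↔ ((k : Int) ≤ zpos t ∧ ∃ s, t[k]? = some s ∧ s ≠ "0") := by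
  induction t with
  | nil => intro k; simp [zpos]
  | cons c t ih =>
    intro k
    rw [zpos_cons]
    by_cases hc : c = "0"
    · subst hc
      rw [if_pos rfl]
      cases k with
      | zero => simp
      | succ k => constructor <;> intro h <;> [omega; exact absurd h.1 (by push_cast; omega)]
    · rw [if_neg hc]
      cases k with
      | zero =>
        have := zpos_nonneg t
        simp [hc]
        omega
      | succ k =>
        have hk := ih k
        have := zpos_nonneg t
        constructor
        · intro h
          have h1 : (k : Int) + 1 ≤ zpos t := by push_cast at h ⊢; omega
          obtain ⟨h2, s, hs⟩ := hk.mp h1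
          exact ⟨by push_cast; omega, s, by simpa using hs.1, hs.2⟩
        · rintro ⟨h1, s, hs1, hs2⟩
          have h2 : (k : Int) + 1 ≤ zpos t :=
            hk.mpr ⟨by push_cast at h1 ⊢; omega, s, by simpa using hs1, hs2⟩
          push_cast
          omega

-- HI basics
theorem HI_le_length (ws : List Int) (d : Int) : HI ws d ≤ ws.length := by
  unfold HI
  induction ws with
  | nil => simp
  | cons w t ih =>
    rw [List.takeWhile_cons]
    split
    · simpa using ih
    · simp
theorem HI_lt_spec (ws : List Int) (d : Int) : ∀ (t : Nat), t < HI ws d → ∃ w, ws[t]? = some w ∧ d ≤ w := by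
  unfold HI
  induction ws with
  | nil => simp
  | cons w t ih =>
    intro t0 ht0
    rw [List.takeWhile_cons] at ht0
    by_cases hd : d ≤ w
    · rw [if_pos (by simpa using hd)] at ht0
      simp only [List.length_cons] at ht0
      cases t0 with
      | zero => exact ⟨w, by simp, hd⟩
      | succ t0 =>
        obtain ⟨w', hw1, hw2⟩ := ih t0 (by omega)
        exact ⟨w', by simpa using hw1, hw2⟩
    · rw [if_neg (by simpa using hd)] at ht0
      simp at ht0
theorem HI_stop (ws : List Int) (d : Int) (h : HI ws d < ws.length) :
    ∃ w, ws[HI ws d]? = some w ∧ w < d := by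
  unfold HI at *
  induction ws with
  | nil => simp at h
  | cons w t ih =>
    rw [List.takeWhile_cons] at h ⊢
    by_cases hd : d ≤ w
    · rw [if_pos (by simpa using hd)] at h ⊢
      simp only [List.length_cons] at h ⊢
      obtain ⟨w', hw1, hw2⟩ := ih (by omega)
      exact ⟨w', by simpa using hw1, hw2⟩
    · rw [if_neg (by simpa using hd)] at h ⊢
      exact ⟨w, by simp, by omega⟩
theorem le_HI (ws : List Int) (d : Int) : ∀ h, h ≤ ws.length →
    (∀ (t : Nat), t < h → ∀ w, ws[t]? = some w → d ≤ w) → h ≤ HI ws d := by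
  unfold HI
  induction ws generalizing d with
  | nil => intro h hle _; simpa using hle
  | cons w t ih =>
    intro h hle hspec
    cases h with
    | zero => simp
    | succ h =>
      have hw : d ≤ w := hspec 0 (by omega) w (by simp)
      rw [List.takeWhile_cons, if_pos (by simpa using hw)]
      simp only [List.length_cons, Nat.add_le_add_iff_right]
      exact ih d h (by simpa using hle)
        (fun t0 ht0 w' hw' => hspec (t0 + 1) (by omega) w' (by simpa using hw'))
theorem HI_antitone (ws : List Int) {d d' : Int} (h : d ≤ d') : HI ws d' ≤ HI ws d := by
  apply le_HI
  · exact HI_le_length ws d'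
  · intro t ht w hw
    obtain ⟨w', hw1, hw2⟩ := HI_lt_spec ws d' t ht
    rw [hw] at hw1
    cases hw1
    omega
theorem mem_take_HI (ws : List Int) (d : Int) : ∀ x, x ∈ ws.take (HI ws d) → d ≤ x := by
  unfold HI
  induction ws with
  | nil => simp
  | cons w t ih =>
    intro x hx
    rw [List.takeWhile_cons] at hx
    by_cases hd : d ≤ w
    · rw [if_pos (by simpa using hd)] at hx
      simp only [List.length_cons, List.take_succ_cons] at hx
      rcases List.mem_cons.mp hx with h | h
      · subst h; exact hd
      · exact ih x h
    · rw [if_neg (by simpa using hd)] at hx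
      simp at hx

-- widthsZ basics
theorem widthsZ_len_le (sc : Int) (rows : List (List String)) :
    (widthsZ sc rows).length ≤ rows.length := by
  induction rows with
  | nil => simp [widthsZ]
  | cons row rest ih =>
    rw [widthsZ]
    split
    · simpa using ih
    · simp
theorem widthsZ_get (sc : Int) (rows : List (List String)) : ∀ (t : Nat) (w : Int),
    (widthsZ sc rows)[t]? = some w →
    ∃ row, rows[t]? = some row ∧ sc < (row.length : Int) ∧
      ¬ ((PySem.List.pyGet? row sc).getD "" = "0") ∧ w = zpos (row.drop sc.toNat) := by
  induction rows with
  | nil => intro t w h; simp [widthsZ] at h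
  | cons row rest ih =>
    intro t w h
    rw [widthsZ] at h
    by_cases hcond : sc < (row.length : Int) ∧ ¬ ((PySem.List.pyGet? row sc).getD "" = "0")
    · rw [if_pos hcond] at h
      cases t with
      | zero =>
        simp only [List.getElem?_cons_zero, Option.some.injEq] at h
        exact ⟨row, by simp, hcond.1, hcond.2, h.symm⟩
      | succ t =>
        simp only [List.getElem?_cons_succ] at h
        obtain ⟨r, h1, h2, h3, h4⟩ := ih t w h
        exact ⟨r, by simpa using h1, h2, h3, h4⟩
    · rw [if_neg hcond] at h
      simp at h
theorem widthsZ_stop (sc : Int) (rows : List (List String))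
    (h : (widthsZ sc rows).length < rows.length) :
    ∃ row, rows[(widthsZ sc rows).length]? = some row ∧
      ¬ (sc < (row.length : Int) ∧ ¬ ((PySem.List.pyGet? row sc).getD "" = "0")) := by
  induction rows with
  | nil => simp [widthsZ] at h
  | cons row rest ih =>
    rw [widthsZ] at h ⊢
    by_cases hcond : sc < (row.length : Int) ∧ ¬ ((PySem.List.pyGet? row sc).getD "" = "0")
    · rw [if_pos hcond] at h ⊢
      simp only [List.length_cons] at h ⊢
      obtain ⟨r, h1, h2⟩ := ih (by omega)
      exact ⟨r, by simpa using h1, h2⟩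
    · rw [if_neg hcond] at h ⊢
      exact ⟨row, by simp, hcond⟩
theorem widthsZ_pos (sc : Int) (h0 : 0 ≤ sc) (rows : List (List String)) :
    ∀ w ∈ widthsZ sc rows, 1 ≤ w := by
  induction rows with
  | nil => simp [widthsZ]
  | cons row rest ih =>
    rw [widthsZ]
    by_cases hcond : sc < (row.length : Int) ∧ ¬ ((PySem.List.pyGet? row sc).getD "" = "0")
    · rw [if_pos hcond]
      intro w hw
      rcases List.mem_cons.mp hw with h | h
      · subst h
        have hz := (zpos_succ_iff (row.drop sc.toNat) 0).mpr
        have hlen : sc.toNat < row.length := by omega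
        have hget : (row.drop sc.toNat)[0]? = some (row[sc.toNat]'hlen) := by
          rw [List.getElem?_drop, Nat.add_zero, List.getElem?_eq_getElem hlen]
        have hne : row[sc.toNat]'hlen ≠ "0" := by
          intro hcontra
          apply hcond.2
          have hpg : PySem.List.pyGet? row sc = some (row[sc.toNat]'hlen) := by
            rw [PySem.List.pyGet?_of_nonneg (h := h0), List.getElem?_eq_getElem hlen]
          rw [hpg, Option.getD_some, hcontra]
        have := hz ⟨by simpa using zpos_nonneg _, _, hget, hne⟩
        simpa using this
      · exact ih w h
    · rw [if_neg hcond]; simp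

theorem innerB_eq_cnt (matrix : List (List String)) (sr sc d : Int) :
    ∀ (l : List Int) (t : Nat),
    innerB matrix sr sc d l (t : Int) = ((cnt matrix sr sc d l.length t : Nat) : Int) := by
  intro l
  induction l with
  | nil => intro t; rfl
  | cons i rest ih =>
    intro t
    rw [innerB]
    simp only [List.length_cons, cnt]
    by_cases h : (((PySem.List.pyGet? matrix (sr + (t : Int))).getD []).length : Int) ≤ sc + d - 1 ∨
        (PySem.List.pyGet? ((PySem.List.pyGet? matrix (sr + (t : Int))).getD []) (sc + d - 1)).getD "" = "0"
    · have hok : okB matrix sr sc d t = false := by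
        unfold okB
        rcases h with h | h <;> simp [h]
      rw [if_pos h, hok]
      simp
    · have hA := fun hh => h (Or.inl hh)
      have hB := fun hh => h (Or.inr hh)
      have hok : okB matrix sr sc d t = true := by
        unfold okB
        rw [Bool.not_eq_eq_eq_not, Bool.not_true, Bool.or_eq_false_iff]
        exact ⟨decide_eq_false hA, decide_eq_false hB⟩
      rw [if_neg h, hok]
      simp only [if_true]
      have hcast : ((t : Int) + 1) = (((t + 1 : Nat)) : Int) := by push_cast; ring
      rw [hcast, ih (t + 1)]

theorem cnt_min (matrix : List (List String)) (sr sc d : Int) (H : Nat)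
    (hok : ∀ s, s < H → okB matrix sr sc d s = true) :
    ∀ (n t : Nat), t ≤ H → (H < t + n → ¬ okB matrix sr sc d H = true) →
    cnt matrix sr sc d n t = min (t + n) H := by
  intro n
  induction n with
  | zero =>
    intro t ht _
    simp only [cnt]
    omega
  | succ n ih =>
    intro t ht hbad
    simp only [cnt]
    by_cases htH : t < H
    · rw [if_pos (hok t htH)]
      rw [ih (t + 1) (by omega) (by intro h; exact hbad (by omega))]
      omega
    · have hteq : t = H := by omega
      subst hteq
      rw [if_neg (hbad (by omega))]
      omega

theorem length_pyRange_one (a b : Int) : (PySem.List.pyRange a b 1).length = (b - a).toNat := by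
  suffices h : ∀ (n : Nat) (a : Int), (b - a).toNat = n → (PySem.List.pyRange a b 1).length = n by
    exact h _ a rfl
  intro n
  induction n with
  | zero =>
    intro a h
    rw [PySem.List.pyRange_one_eq_nil (by omega)]
    rfl
  | succ n ih =>
    intro a h
    rw [PySem.List.pyRange_one_cons (by omega)]
    simp [ih (a + 1) (by omega)]

theorem rowAt (matrix : List (List String)) (sr : Int) (hsr : 0 ≤ sr) (t : Nat)
    (row : List String) (h : (matrix.drop sr.toNat)[t]? = some row) :
    (PySem.List.pyGet? matrix (sr + (t : Int))).getD [] = row := by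
  rw [PySem.List.pyGet?_of_nonneg matrix (show (0 : Int) ≤ sr + (t : Int) by omega)]
  have hidx : (sr + (t : Int)).toNat = sr.toNat + t := by omega
  rw [hidx, ← List.getElem?_drop, h]
  rfl

-- the cell test matches "width ≥ k+1" on rows that carry a width
theorem ok_iff (matrix : List (List String)) (sr sc : Int) (h0sr : 0 ≤ sr) (h0sc : 0 ≤ sc)
    (k : Nat) : ∀ (t : Nat) (w : Int),
    (widthsZ sc (matrix.drop sr.toNat))[t]? = some w → (k : Int) ≤ w →
    (okB matrix sr sc ((k : Int) + 1) t = true ↔ (k : Int) + 1 ≤ w) := by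
  intro t w hw hk
  obtain ⟨row, hrow, hsclen, hanchor, hwz⟩ := widthsZ_get sc _ t w hw
  have hm := rowAt matrix sr h0sr t row hrow
  have hj : sc + ((k : Int) + 1) - 1 = sc + (k : Int) := by ring
  have htail : (row.drop sc.toNat)[k]? = row[sc.toNat + k]? := List.getElem?_drop
  subst hwz
  rw [zpos_succ_iff _ k]
  constructor
  · intro hok
    refine ⟨hk, ?_⟩
    unfold okB at hok
    rw [Bool.not_eq_eq_eq_not, Bool.not_true, Bool.or_eq_false_iff,
      decide_eq_false_iff_not, decide_eq_false_iff_not, hm, hj] at hok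
    obtain ⟨hA, hB⟩ := hok
    have hlt : sc.toNat + k < row.length := by omega
    have hg : PySem.List.pyGet? row (sc + (k : Int)) = some (row[sc.toNat + k]'hlt) := by
      rw [PySem.List.pyGet?_of_nonneg row (by omega)]
      have : (sc + (k : Int)).toNat = sc.toNat + k := by omega
      rw [this, List.getElem?_eq_getElem hlt]
    rw [hg, Option.getD_some] at hB
    exact ⟨_, by rw [htail, List.getElem?_eq_getElem hlt], hB⟩
  · rintro ⟨-, s, hs1, hs2⟩
    rw [htail] at hs1
    have hlt : sc.toNat + k < row.length := by
      by_contra hge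
      rw [List.getElem?_eq_none_iff.mpr (by omega)] at hs1
      cases hs1
    unfold okB
    rw [Bool.not_eq_eq_eq_not, Bool.not_true, Bool.or_eq_false_iff,
      decide_eq_false_iff_not, decide_eq_false_iff_not, hm, hj]
    have hg : PySem.List.pyGet? row (sc + (k : Int)) = some (row[sc.toNat + k]'hlt) := by
      rw [PySem.List.pyGet?_of_nonneg row (by omega)]
      have : (sc + (k : Int)).toNat = sc.toNat + k := by omega
      rw [this, List.getElem?_eq_getElem hlt]
    refine ⟨by omega, ?_⟩
    rw [hg, Option.getD_some]
    rw [List.getElem?_eq_getElem hlt] at hs1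
    cases hs1
    exact hs2

theorem scan_first (matrix : List (List String)) (sr sc : Int) (h0sr : 0 ≤ sr) (h0sc : 0 ≤ sc)
    (hrows : ∀ row ∈ matrix.drop sr.toNat, sc < (row.length : Int)) :
    cnt matrix sr sc 1 ((matrix.length : Int) - sr).toNat 0 =
      HI (widthsZ sc (matrix.drop sr.toNat)) 1 := by
  have hone : ((0 : Nat) : Int) + 1 = 1 := by norm_num
  have hok : ∀ s, s < HI (widthsZ sc (matrix.drop sr.toNat)) 1 → okB matrix sr sc 1 s = true := by
    intro s hs
    obtain ⟨w, hw1, hw2⟩ := HI_lt_spec _ 1 s hs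
    have h := (ok_iff matrix sr sc h0sr h0sc 0 s w hw1 (by omega)).mpr (by omega)
    rwa [hone] at h
  have hlen : (widthsZ sc (matrix.drop sr.toNat)).length ≤ (matrix.drop sr.toNat).length :=
    widthsZ_len_le sc _
  have hdlen : (matrix.drop sr.toNat).length = matrix.length - sr.toNat := List.length_drop
  have hHeq : HI (widthsZ sc (matrix.drop sr.toNat)) 1 ≤ (widthsZ sc (matrix.drop sr.toNat)).length :=
    HI_le_length _ 1
  have hbad : HI (widthsZ sc (matrix.drop sr.toNat)) 1 < 0 + ((matrix.length : Int) - sr).toNat →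
      ¬ okB matrix sr sc 1 (HI (widthsZ sc (matrix.drop sr.toNat)) 1) = true := by
    intro hlt hcontra
    by_cases hcase : HI (widthsZ sc (matrix.drop sr.toNat)) 1 < (widthsZ sc (matrix.drop sr.toNat)).length
    · obtain ⟨w, hw1, hw2⟩ := HI_stop _ 1 hcase
      have := widthsZ_pos sc h0sc (matrix.drop sr.toNat) w (List.mem_of_getElem? hw1)
      omega
    · have hHL : HI (widthsZ sc (matrix.drop sr.toNat)) 1 = (widthsZ sc (matrix.drop sr.toNat)).length := by omega
      have hwsl : (widthsZ sc (matrix.drop sr.toNat)).length < (matrix.drop sr.toNat).length := by omega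
      obtain ⟨row, hrow, hblk⟩ := widthsZ_stop sc _ hwsl
      have hm := rowAt matrix sr h0sr _ row hrow
      have hsc' : sc < (row.length : Int) := hrows row (List.mem_of_getElem? hrow)
      have hanchor : (PySem.List.pyGet? row sc).getD "" = "0" := by
        by_contra hno
        exact hblk ⟨hsc', hno⟩
      unfold okB at hcontra
      rw [Bool.not_eq_eq_eq_not, Bool.not_true, Bool.or_eq_false_iff,
        decide_eq_false_iff_not, decide_eq_false_iff_not, hHL, hm] at hcontra
      have he : sc + 1 - 1 = sc := by ring
      rw [he] at hcontra
      exact hcontra.2 hanchor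
  have h := cnt_min matrix sr sc 1 (HI (widthsZ sc (matrix.drop sr.toNat)) 1) hok
    ((matrix.length : Int) - sr).toNat 0 (Nat.zero_le _) hbad
  rw [h]
  omega

theorem scan_step (matrix : List (List String)) (sr sc : Int) (h0sr : 0 ≤ sr) (h0sc : 0 ≤ sc)
    (k : Nat) :
    cnt matrix sr sc ((k : Int) + 1) (HI (widthsZ sc (matrix.drop sr.toNat)) (k : Int)) 0 =
      HI (widthsZ sc (matrix.drop sr.toNat)) ((k : Int) + 1) := by
  have hok : ∀ s, s < HI (widthsZ sc (matrix.drop sr.toNat)) ((k : Int) + 1) →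
      okB matrix sr sc ((k : Int) + 1) s = true := by
    intro s hs
    obtain ⟨w, hw1, hw2⟩ := HI_lt_spec _ ((k : Int) + 1) s hs
    exact (ok_iff matrix sr sc h0sr h0sc k s w hw1 (by omega)).mpr hw2
  have hbad : HI (widthsZ sc (matrix.drop sr.toNat)) ((k : Int) + 1) <
      0 + HI (widthsZ sc (matrix.drop sr.toNat)) (k : Int) →
      ¬ okB matrix sr sc ((k : Int) + 1) (HI (widthsZ sc (matrix.drop sr.toNat)) ((k : Int) + 1)) = true := by
    intro hlt hcontra
    have hkl := HI_le_length (widthsZ sc (matrix.drop sr.toNat)) (k : Int)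
    have h1 : HI (widthsZ sc (matrix.drop sr.toNat)) ((k : Int) + 1) <
        (widthsZ sc (matrix.drop sr.toNat)).length := by omega
    obtain ⟨w, hw1, hw2⟩ := HI_stop _ ((k : Int) + 1) h1
    obtain ⟨w', hw1', hw2'⟩ := HI_lt_spec (widthsZ sc (matrix.drop sr.toNat)) (k : Int)
      (HI (widthsZ sc (matrix.drop sr.toNat)) ((k : Int) + 1)) (by omega)
    rw [hw1] at hw1'
    cases hw1'
    have := (ok_iff matrix sr sc h0sr h0sc k _ w hw1 hw2').mp hcontra
    omega
  have hanti : HI (widthsZ sc (matrix.drop sr.toNat)) ((k : Int) + 1) ≤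
      HI (widthsZ sc (matrix.drop sr.toNat)) (k : Int) := HI_antitone _ (by omega)
  have h := cnt_min matrix sr sc ((k : Int) + 1)
    (HI (widthsZ sc (matrix.drop sr.toNat)) ((k : Int) + 1)) hok
    (HI (widthsZ sc (matrix.drop sr.toNat)) (k : Int)) 0 (Nat.zero_le _) hbad
  rw [h]
  omega

theorem outer_eq (matrix : List (List String)) (sr sc cap : Int) (h0sr : 0 ≤ sr) (h0sc : 0 ≤ sc) :
    ∀ (n k : Nat) (best : Int), 1 ≤ k → 0 ≤ best → (cap - (k : Int)).toNat = n →
    outerB matrix sr sc (PySem.List.pyRange ((k : Int) + 1) (cap + 1) 1)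
        ((HI (widthsZ sc (matrix.drop sr.toNat)) (k : Int) : Nat) : Int) best =
      maxfrom best ((PySem.List.pyRange ((k : Int) + 1) (cap + 1) 1).map
        (fun d => d * ((HI (widthsZ sc (matrix.drop sr.toNat)) d : Nat) : Int))) := by
  intro n
  induction n with
  | zero =>
    intro k best hk hbest hn
    rw [PySem.List.pyRange_one_eq_nil (by omega)]
    rfl
  | succ n ih =>
    intro k best hk hbest hn
    have hklt : (k : Int) + 1 < cap + 1 := by omega
    rw [PySem.List.pyRange_one_cons hklt]
    simp only [outerB]
    have hlen : (PySem.List.pyRange 0 ((HI (widthsZ sc (matrix.drop sr.toNat)) (k : Int) : Nat) : Int) 1).length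
        = HI (widthsZ sc (matrix.drop sr.toNat)) (k : Int) := by
      rw [length_pyRange_one]; omega
    have hinner : innerB matrix sr sc ((k : Int) + 1)
        (PySem.List.pyRange 0 ((HI (widthsZ sc (matrix.drop sr.toNat)) (k : Int) : Nat) : Int) 1) 0
        = ((HI (widthsZ sc (matrix.drop sr.toNat)) ((k : Int) + 1) : Nat) : Int) := by
      have h := innerB_eq_cnt matrix sr sc ((k : Int) + 1)
        (PySem.List.pyRange 0 ((HI (widthsZ sc (matrix.drop sr.toNat)) (k : Int) : Nat) : Int) 1) 0
      rw [hlen] at h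
      simp only [Nat.cast_zero] at h
      rw [h, scan_step matrix sr sc h0sr h0sc k]
    rw [hinner]
    by_cases h0 : HI (widthsZ sc (matrix.drop sr.toNat)) ((k : Int) + 1) = 0
    · rw [if_pos (by rw [h0]; rfl)]
      symm
      apply maxfrom_const_le
      intro y hy
      obtain ⟨d, hd1, hd2⟩ := List.mem_map.mp hy
      rcases List.mem_cons.mp hd1 with h | h
      · subst h
        rw [← hd2, h0]
        simpa using hbest
      · have hdm := PySem.List.mem_pyRange_one.mp h
        have : HI (widthsZ sc (matrix.drop sr.toNat)) d ≤
            HI (widthsZ sc (matrix.drop sr.toNat)) ((k : Int) + 1) := HI_antitone _ (by omega)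
        have hz : HI (widthsZ sc (matrix.drop sr.toNat)) d = 0 := by omega
        rw [← hd2, hz]
        simpa using hbest
    · rw [if_neg (by simpa using h0)]
      have hcast : ((k : Int) + 1) = (((k + 1 : Nat)) : Int) := by push_cast; ring
      have hih := ih (k + 1) (max best (((k : Int) + 1) *
          ((HI (widthsZ sc (matrix.drop sr.toNat)) ((k : Int) + 1) : Nat) : Int)))
        (by omega) (le_trans hbest (le_max_left _ _)) (by omega)
      rw [← hcast] at hih
      rw [hih]
      rfl

theorem dual (ws : List Int) (cap : Int) :
    maxfrom 0 ((List.range ws.length).map (fun (k : Nat) => (1 + (k : Int)) * mList ws cap (k + 1))) =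
      maxfrom 0 ((PySem.List.pyRange 1 (cap + 1) 1).map (fun d => d * ((HI ws d : Nat) : Int))) := by
  apply le_antisymm
  · apply maxfrom_le
    · exact le_maxfrom_self _ 0
    · intro y hy
      obtain ⟨k, hk1, hk2⟩ := List.mem_map.mp hy
      have hkn := List.mem_range.mp hk1
      by_cases hm : mList ws cap (k + 1) ≤ 0
      · calc y ≤ 0 := by
              rw [← hk2]
              exact mul_nonpos_of_nonneg_of_nonpos (by positivity) hm
          _ ≤ _ := le_maxfrom_self _ 0
      · have hm1 : 1 ≤ mList ws cap (k + 1) := by omega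
        have hmcap : mList ws cap (k + 1) ≤ cap := foldl_min_le_init _ cap
        have hmem : mList ws cap (k + 1) ∈ PySem.List.pyRange 1 (cap + 1) 1 :=
          PySem.List.mem_pyRange_one.mpr ⟨hm1, by omega⟩
        have hHI : k + 1 ≤ HI ws (mList ws cap (k + 1)) := by
          apply le_HI
          · omega
          · intro t ht w hw
            apply foldl_min_le_mem _ cap w
            apply List.mem_of_getElem? (i := t)
            rw [List.getElem?_take_of_lt (by omega)]
            exact hw
        calc y = (1 + (k : Int)) * mList ws cap (k + 1) := hk2.symm
          _ ≤ ((HI ws (mList ws cap (k + 1)) : Nat) : Int) * mList ws cap (k + 1) := by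
              apply mul_le_mul_of_nonneg_right _ (by omega)
              omega
          _ = mList ws cap (k + 1) * ((HI ws (mList ws cap (k + 1)) : Nat) : Int) := by ring
          _ ≤ _ := le_maxfrom_of_mem _ 0 _ (List.mem_map.mpr ⟨_, hmem, rfl⟩)
  · apply maxfrom_le
    · exact le_maxfrom_self _ 0
    · intro y hy
      obtain ⟨d, hd1, hd2⟩ := List.mem_map.mp hy
      have hdm := PySem.List.mem_pyRange_one.mp hd1
      by_cases h0 : HI ws d = 0
      · rw [← hd2, h0]
        simpa using le_maxfrom_self _ (0 : Int)
      · have hHle : HI ws d ≤ ws.length := HI_le_length ws d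
        have hdm1 : d ≤ mList ws cap (HI ws d) := by
          apply le_foldl_min
          · omega
          · intro x hx
            exact mem_take_HI ws d x hx
        have hmem : (HI ws d - 1) ∈ List.range ws.length := List.mem_range.mpr (by omega)
        have hterm : (1 + ((HI ws d - 1 : Nat) : Int)) * mList ws cap ((HI ws d - 1) + 1)
            ∈ (List.range ws.length).map (fun (k : Nat) => (1 + (k : Int)) * mList ws cap (k + 1)) :=
          List.mem_map.mpr ⟨_, hmem, rfl⟩
        have he1 : (HI ws d - 1) + 1 = HI ws d := by omega
        have he2 : (1 + ((HI ws d - 1 : Nat) : Int)) = ((HI ws d : Nat) : Int) := by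
          omega
        rw [he1, he2] at hterm
        calc y = d * ((HI ws d : Nat) : Int) := hd2.symm
          _ ≤ mList ws cap (HI ws d) * ((HI ws d : Nat) : Int) := by
              apply mul_le_mul_of_nonneg_right hdm1 (by positivity)
          _ = ((HI ws d : Nat) : Int) * mList ws cap (HI ws d) := by ring
          _ ≤ _ := le_maxfrom_of_mem _ 0 _ hterm

theorem A_side (matrix : List (List String)) (sr sc : Int) (hsr : 0 ≤ sr) (hsc : 0 ≤ sc)
    (hrows : ∀ row ∈ matrix.drop sr.toNat, sc < (row.length : Int)) :
    helper matrix sr sc =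
      maxfrom 0 ((List.range (widthsZ sc (matrix.drop sr.toNat)).length).map
        (fun (k : Nat) => (1 + (k : Int)) *
          mList (widthsZ sc (matrix.drop sr.toNat))
            ((((PySem.List.pyGet? matrix 0).getD []).length : Int) - sc) (k + 1))) := by
  unfold helper
  by_cases hbig : (matrix.length : Int) ≤ sr
  · rw [PySem.List.pyRange_one_eq_nil hbig]
    rw [List.drop_eq_nil_of_le (by omega)]
    simp [loopA, widthsZ, maxfrom]
  · rw [not_le] at hbig
    have hpre' : matrix = matrix.take sr.toNat ++ matrix.drop sr.toNat := by simp
    have hlen : ((matrix.take sr.toNat).length : Int) = sr := by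
      simp only [List.length_take]; omega
    have h := loop_eq matrix sr sc hsc (matrix.drop sr.toNat) (matrix.take sr.toNat)
      hpre' hrows ((((PySem.List.pyGet? matrix 0).getD []).length : Int) - sc) 0
    rw [hlen] at h
    rw [h]
    have e : sr - sr + 1 = (1 : Int) := by ring
    rw [e, fold_stepB]

theorem B_side (matrix : List (List String)) (sr sc : Int) (hsr : 0 ≤ sr) (hsc : 0 ≤ sc)
    (hrows : ∀ row ∈ matrix.drop sr.toNat, sc < (row.length : Int)) :
    helper_alt matrix sr sc =
      maxfrom 0 ((PySem.List.pyRange 1 (((((PySem.List.pyGet? matrix 0).getD []).length : Int) - sc) + 1) 1).map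
        (fun d => d * ((HI (widthsZ sc (matrix.drop sr.toNat)) d : Nat) : Int))) := by
  show outerB matrix sr sc
      (PySem.List.pyRange 1 ((((PySem.List.pyGet? matrix 0).getD []).length : Int) - sc + 1) 1)
      ((matrix.length : Int) - sr) 0 = _
  by_cases hcap : (((PySem.List.pyGet? matrix 0).getD []).length : Int) - sc + 1 ≤ 1
  · rw [PySem.List.pyRange_one_eq_nil hcap]
    rfl
  · rw [not_le] at hcap
    rw [PySem.List.pyRange_one_cons (by omega)]
    simp only [outerB]
    have hlen : (PySem.List.pyRange 0 ((matrix.length : Int) - sr) 1).length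
        = ((matrix.length : Int) - sr).toNat := by
      rw [length_pyRange_one]; norm_num
    have hinner : innerB matrix sr sc 1 (PySem.List.pyRange 0 ((matrix.length : Int) - sr) 1) 0
        = ((HI (widthsZ sc (matrix.drop sr.toNat)) 1 : Nat) : Int) := by
      have h := innerB_eq_cnt matrix sr sc 1 (PySem.List.pyRange 0 ((matrix.length : Int) - sr) 1) 0
      rw [hlen] at h
      simp only [Nat.cast_zero] at h
      rw [h, scan_first matrix sr sc hsr hsc hrows]
    rw [hinner]
    by_cases h0 : HI (widthsZ sc (matrix.drop sr.toNat)) 1 = 0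
    · rw [if_pos (by rw [h0]; rfl)]
      symm
      apply maxfrom_const_le
      intro y hy
      obtain ⟨d, hd1, hd2⟩ := List.mem_map.mp hy
      have hd' : 1 ≤ d := by
        rcases List.mem_cons.mp hd1 with h | h
        · omega
        · have := PySem.List.mem_pyRange_one.mp h
          omega
      have hanti : HI (widthsZ sc (matrix.drop sr.toNat)) d ≤
          HI (widthsZ sc (matrix.drop sr.toNat)) 1 := HI_antitone _ (by omega)
      have hz : HI (widthsZ sc (matrix.drop sr.toNat)) d = 0 := by omega
      rw [← hd2, hz]
      simp
    · rw [if_neg (by simpa using h0)]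
      have hone : ((1 : Nat) : Int) = 1 := by norm_num
      have hih := outer_eq matrix sr sc ((((PySem.List.pyGet? matrix 0).getD []).length : Int) - sc)
        hsr hsc (((((PySem.List.pyGet? matrix 0).getD []).length : Int) - sc) - 1).toNat 1
        (max 0 (1 * ((HI (widthsZ sc (matrix.drop sr.toNat)) 1 : Nat) : Int)))
        le_rfl (le_max_left _ _) (by omega)
      rw [hone] at hih
      rw [hih]
      rfl

-- ===== VERDICT (by name: the statement is the Claim_ definition above) =====
theorem helper_spec : Claim_equal_helper := by
  intro matrix sr sc _ hpre
  obtain ⟨hne, hsr, hsc, hrows⟩ := hpre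
  unfold Spec_helper
  rw [A_side matrix sr sc hsr hsc hrows, B_side matrix sr sc hsr hsc hrows, dual]
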